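-- pv_equiv track=rewrite | github.com/himanshunita009/Python-DSA | Uber/Bowlling DP.py | maxBowlingScore
-- ===== SOURCE A (Python) =====
-- MOD = int(1e9) + 7
--
-- def maxBowlingScore(arr):
--     n = len(arr)
--     # Pad the array with 1 on both sides to handle boundaries
--     nums = [1] + arr + [1]
--
--     # Create a 2D DP array initialized with -1
--     dp = [[-1 for _ in range(n + 2)] for _ in range(n + 2)]
--
--     def solve(l, r):
--         if r - l + 1 < 2:
--             return 0
--         if dp[l][r] != -1:
--             return dp[l][r]
--
--         max_score = 0
--         for i in range(l, r):
--             # Try removing nums[i] and nums[i+1]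
--             left = nums[l - 1] if l - 1 >= 0 else 1
--             right = nums[r + 1] if r + 1 < len(nums) else 1
--             score = left * nums[i] * nums[i + 1] * right
--             score += solve(l, i - 1) + solve(i + 2, r)
--             max_score = max(max_score, score)
--
--         dp[l][r] = max_score % MOD
--         return dp[l][r]
--
--     return solve(1, n)
-- ===== SOURCE B (Python) =====
-- MOD = int(1e9) + 7
--
-- def maxBowlingScore(arr):
--     n = len(arr)
--     nums = [1] + arr + [1]
--     dp = {}
--     for length in range(2, n + 1):
--         for l in range(1, n - length + 2):
--             r = l + length - 1
--             best = 0
--             for i in range(l, r):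
--                 score = nums[l - 1] * nums[i] * nums[i + 1] * nums[r + 1]
--                 score += dp.get((l, i - 1), 0) + dp.get((i + 2, r), 0)
--                 best = max(best, score)
--             dp[(l, r)] = best % MOD
--     return dp.get((1, n), 0)
-- ===== Notes on version B (the rewrite author's own statement) =====
-- stated objective: alternative
-- what changed: Replaces A's top-down memoized recursion (recursive solve with a 2D memo table) by an iterative bottom-up interval DP that fills a dictionary by increasing interval length, with the identical recurrence and mod placement.
import Mathlib
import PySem

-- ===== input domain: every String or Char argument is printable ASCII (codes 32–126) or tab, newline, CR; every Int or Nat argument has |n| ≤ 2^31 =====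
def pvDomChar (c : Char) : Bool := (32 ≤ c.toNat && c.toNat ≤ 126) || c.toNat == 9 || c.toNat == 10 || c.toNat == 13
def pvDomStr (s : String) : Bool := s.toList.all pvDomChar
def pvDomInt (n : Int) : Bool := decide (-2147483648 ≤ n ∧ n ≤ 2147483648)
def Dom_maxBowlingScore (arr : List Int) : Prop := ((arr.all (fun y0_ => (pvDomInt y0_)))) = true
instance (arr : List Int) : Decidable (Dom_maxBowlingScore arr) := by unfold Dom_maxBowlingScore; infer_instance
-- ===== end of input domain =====

-- B replaces A's top-down memoized recursion by an iterative bottom-up interval DP over a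
-- dictionary (same recurrence, same mod placement); objective: alternative decomposition.

-- ===== PORT A =====
def pvMOD : Int := 1000000007

-- A's `solve(l, r)`: the memo table `dp` is a pure cache (it never changes the value solve
-- returns), so the port is the same recursion with a fuel argument for termination; the fuel
-- (interval length bounds the recursion depth) is always sufficient at every reachable call.
def pvSolveA (nums : List Int) : Nat → Int → Int → Int
  | 0, _, _ => 0
  | fuel+1, l, r =>
    if r - l + 1 < 2 then 0
    else
      PySem.Int.mod
        ((PySem.List.pyRange l r 1).foldl (fun maxScore i =>
          let left := if l - 1 ≥ 0 then PySem.List.pyGetD nums (l-1) 1 else 1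
          let right := if r + 1 < (nums.length : Int) then PySem.List.pyGetD nums (r+1) 1 else 1
          let score := left * PySem.List.pyGetD nums i 1 * PySem.List.pyGetD nums (i+1) 1 * right
          let score2 := score + pvSolveA nums fuel l (i-1) + pvSolveA nums fuel (i+2) r
          max maxScore score2) 0)
        pvMOD

def maxBowlingScore (arr : List Int) : Int :=
  pvSolveA (1 :: (arr ++ [1])) arr.length 1 (arr.length : Int)

-- ===== PORT B =====
-- B's inner loop: best score over split points i for the interval [l, r], reading shorter
-- intervals from the dict (dp.get((l', r'), 0)).  All nums indices are in range in Source B,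
-- so pyGetD with an arbitrary default is exact.
def pvBestB (nums : List Int) (dp : PySem.Dict (Int × Int) Int) (l r : Int) : Int :=
  (PySem.List.pyRange l r 1).foldl (fun best i =>
    let score := PySem.List.pyGetD nums (l-1) 1 * PySem.List.pyGetD nums i 1 *
                 PySem.List.pyGetD nums (i+1) 1 * PySem.List.pyGetD nums (r+1) 1
    let score2 := score + dp.getD (l, i-1) 0 + dp.getD (i+2, r) 0
    max best score2) 0

def maxBowlingScore_alt (arr : List Int) : Int :=
  let n : Int := arr.length
  let nums := 1 :: (arr ++ [1])
  let dp := (PySem.List.pyRange 2 (n+1) 1).foldl (fun dp length =>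
      (PySem.List.pyRange 1 (n - length + 2) 1).foldl (fun dp l =>
        dp.insert (l, l + length - 1)
          (PySem.Int.mod (pvBestB nums dp l (l + length - 1)) pvMOD)) dp)
    PySem.Dict.empty
  dp.getD (1, n) 0

-- ===== PRECONDITION & SPEC =====
def Spec_maxBowlingScore (arr : List Int) (out : Int) : Prop := out = maxBowlingScore_alt arr
instance (arr : List Int) (out : Int) : Decidable (Spec_maxBowlingScore arr out) := by unfold Spec_maxBowlingScore; infer_instance

-- ===== CLAIM (what is proved, stated in full; the proofs are below) =====
def Claim_equal_maxBowlingScore : Prop := ∀ (arr : List Int), Dom_maxBowlingScore arr → Spec_maxBowlingScore arr (maxBowlingScore arr)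

-- ===== LEMMAS AND PROOFS =====

-- solve(l, r) with its canonical fuel (the interval length)
def pvS (nums : List Int) (l r : Int) : Int := pvSolveA nums (r - l + 1).toNat l r

theorem pvSolveA_fuel (nums : List Int) :
    ∀ (f g : Nat) (l r : Int), (r - l + 1).toNat ≤ f → (r - l + 1).toNat ≤ g →
      pvSolveA nums f l r = pvSolveA nums g l r := by
  intro f
  induction f with
  | zero =>
    intro g l r hf hg
    cases g with
    | zero => rfl
    | succ g' =>
      have h2 : r - l + 1 < 2 := by omega
      simp [pvSolveA, h2]
  | succ f' ih =>
    intro g l r hf hg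
    cases g with
    | zero =>
      have h2 : r - l + 1 < 2 := by omega
      simp [pvSolveA, h2]
    | succ g' =>
      by_cases hlen : r - l + 1 < 2
      · simp [pvSolveA, hlen]
      · simp only [pvSolveA, if_neg hlen]
        congr 1
        apply PySem.List.foldl_congr_mem
        intro acc i hi
        have hmem := (PySem.List.mem_pyRange_one).mp hi
        have h1 : pvSolveA nums f' l (i-1) = pvSolveA nums g' l (i-1) :=
          ih g' l (i-1) (by omega) (by omega)
        have h2 : pvSolveA nums f' (i+2) r = pvSolveA nums g' (i+2) r :=
          ih g' (i+2) r (by omega) (by omega)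
        simp only [h1, h2]

theorem pvSolveA_eq_pvS (nums : List Int) (f : Nat) (l r : Int)
    (h : (r - l + 1).toNat ≤ f) : pvSolveA nums f l r = pvS nums l r := by
  exact pvSolveA_fuel nums f (r - l + 1).toNat l r h le_rfl

theorem pvS_short (nums : List Int) (l r : Int) (h : r - l + 1 < 2) : pvS nums l r = 0 := by
  unfold pvS
  rcases hk : (r - l + 1).toNat with _ | k
  · rfl
  · simp [pvSolveA, h]

-- the loop invariant: after all lengths < L and, within length L, all left ends < m are done
def pvInv (nums : List Int) (n L m : Int) (dp : PySem.Dict (Int × Int) Int) : Prop :=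
  ∀ l r : Int, dp.getD (l, r) 0 =
    if 1 ≤ l ∧ r ≤ n ∧ 2 ≤ r - l + 1 ∧ (r - l + 1 < L ∨ (r - l + 1 = L ∧ l < m))
    then pvS nums l r else 0

theorem pvStep (arr : List Int) (L m : Int) (dp : PySem.Dict (Int × Int) Int)
    (hL2 : 2 ≤ L) (hm1 : 1 ≤ m)
    (hmn : m ≤ (arr.length : Int) - L + 1)
    (hinv : pvInv (1 :: (arr ++ [1])) (arr.length : Int) L m dp) :
    pvInv (1 :: (arr ++ [1])) (arr.length : Int) L (m+1)
      (dp.insert (m, m + L - 1)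
        (PySem.Int.mod (pvBestB (1 :: (arr ++ [1])) dp m (m + L - 1)) pvMOD)) := by
  have hkeyval : PySem.Int.mod (pvBestB (1 :: (arr ++ [1])) dp m (m + L - 1)) pvMOD
      = pvS (1 :: (arr ++ [1])) m (m + L - 1) := by
    have hfuel : ((m + L - 1) - m + 1).toNat = (L.toNat - 1) + 1 := by omega
    unfold pvS
    rw [hfuel]
    simp only [pvSolveA, if_neg (show ¬((m + L - 1) - m + 1 < 2) by omega)]
    congr 1
    unfold pvBestB
    apply PySem.List.foldl_congr_mem
    intro acc i hi
    have hmem := PySem.List.mem_pyRange_one.mp hi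
    have h1 : dp.getD (m, i - 1) 0 = pvS (1 :: (arr ++ [1])) m (i - 1) := by
      rw [hinv m (i - 1)]
      by_cases hc : 2 ≤ (i - 1) - m + 1
      · rw [if_pos (by omega)]
      · rw [if_neg (by omega), pvS_short _ _ _ (by omega)]
    have h2 : dp.getD (i + 2, m + L - 1) 0 = pvS (1 :: (arr ++ [1])) (i + 2) (m + L - 1) := by
      rw [hinv (i + 2) (m + L - 1)]
      by_cases hc : 2 ≤ (m + L - 1) - (i + 2) + 1
      · rw [if_pos (by omega)]
      · rw [if_neg (by omega), pvS_short _ _ _ (by omega)]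
    have h3 : pvSolveA (1 :: (arr ++ [1])) (L.toNat - 1) m (i - 1)
        = pvS (1 :: (arr ++ [1])) m (i - 1) := pvSolveA_eq_pvS _ _ _ _ (by omega)
    have h4 : pvSolveA (1 :: (arr ++ [1])) (L.toNat - 1) (i + 2) (m + L - 1)
        = pvS (1 :: (arr ++ [1])) (i + 2) (m + L - 1) := pvSolveA_eq_pvS _ _ _ _ (by omega)
    have hright : (m + L - 1) + 1 < (((1 :: (arr ++ [1])) : List Int).length : Int) := by
      simp [List.length_append]; omega
    simp only [h1, h2, h3, h4, if_pos (show (m : Int) - 1 ≥ 0 by omega), if_pos hright]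
  intro l r
  rw [PySem.Dict.getD_insert]
  by_cases hkey : ((l, r) : Int × Int) = (m, m + L - 1)
  · rw [Prod.mk.injEq] at hkey
    obtain ⟨hl, hr⟩ := hkey
    subst hl; subst hr
    rw [if_pos rfl, if_pos (by omega), hkeyval]
  · rw [if_neg hkey, hinv l r]
    rw [Prod.mk.injEq] at hkey
    split_ifs with hA hB <;> first | rfl | (exfalso; omega)

theorem pvInner (arr : List Int) (L : Int) (hL2 : 2 ≤ L) :
    ∀ (m : Int) (dp : PySem.Dict (Int × Int) Int), 1 ≤ m →
      pvInv (1 :: (arr ++ [1])) (arr.length : Int) L m dp →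
      pvInv (1 :: (arr ++ [1])) (arr.length : Int) L ((arr.length : Int) - L + 2)
        ((PySem.List.pyRange m ((arr.length : Int) - L + 2) 1).foldl (fun dp l =>
          dp.insert (l, l + L - 1)
            (PySem.Int.mod (pvBestB (1 :: (arr ++ [1])) dp l (l + L - 1)) pvMOD)) dp) := by
  have main : ∀ (k : Nat) (m : Int) (dp : PySem.Dict (Int × Int) Int), 1 ≤ m →
      (((arr.length : Int) - L + 2) - m).toNat ≤ k →
      pvInv (1 :: (arr ++ [1])) (arr.length : Int) L m dp →
      pvInv (1 :: (arr ++ [1])) (arr.length : Int) L ((arr.length : Int) - L + 2)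
        ((PySem.List.pyRange m ((arr.length : Int) - L + 2) 1).foldl (fun dp l =>
          dp.insert (l, l + L - 1)
            (PySem.Int.mod (pvBestB (1 :: (arr ++ [1])) dp l (l + L - 1)) pvMOD)) dp) := by
    intro k
    induction k with
    | zero =>
      intro m dp hm1 hk hinv
      rw [PySem.List.pyRange_one_eq_nil (by omega), List.foldl_nil]
      intro l r
      rw [hinv l r]
      split_ifs with hA hB <;> first | rfl | (exfalso; omega)
    | succ k ih =>
      intro m dp hm1 hk hinv
      by_cases hdone : (arr.length : Int) - L + 2 ≤ m
      · rw [PySem.List.pyRange_one_eq_nil (by omega), List.foldl_nil]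
        intro l r
        rw [hinv l r]
        split_ifs with hA hB <;> first | rfl | (exfalso; omega)
      · rw [PySem.List.pyRange_one_cons (by omega), List.foldl_cons]
        exact ih (m + 1) _ (by omega) (by omega)
          (pvStep arr L m dp hL2 hm1 (by omega) hinv)
  intro m dp hm1 hinv
  exact main (((arr.length : Int) - L + 2) - m).toNat m dp hm1 le_rfl hinv

theorem pvOuter (arr : List Int) :
    ∀ (L : Int) (dp : PySem.Dict (Int × Int) Int), 2 ≤ L →
      pvInv (1 :: (arr ++ [1])) (arr.length : Int) L 1 dp →
      pvInv (1 :: (arr ++ [1])) (arr.length : Int) ((arr.length : Int) + 1) 1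
        ((PySem.List.pyRange L ((arr.length : Int) + 1) 1).foldl (fun dp length =>
          (PySem.List.pyRange 1 ((arr.length : Int) - length + 2) 1).foldl (fun dp l =>
            dp.insert (l, l + length - 1)
              (PySem.Int.mod (pvBestB (1 :: (arr ++ [1])) dp l (l + length - 1)) pvMOD)) dp) dp) := by
  have main : ∀ (k : Nat) (L : Int) (dp : PySem.Dict (Int × Int) Int), 2 ≤ L →
      (((arr.length : Int) + 1) - L).toNat ≤ k →
      pvInv (1 :: (arr ++ [1])) (arr.length : Int) L 1 dp →
      pvInv (1 :: (arr ++ [1])) (arr.length : Int) ((arr.length : Int) + 1) 1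
        ((PySem.List.pyRange L ((arr.length : Int) + 1) 1).foldl (fun dp length =>
          (PySem.List.pyRange 1 ((arr.length : Int) - length + 2) 1).foldl (fun dp l =>
            dp.insert (l, l + length - 1)
              (PySem.Int.mod (pvBestB (1 :: (arr ++ [1])) dp l (l + length - 1)) pvMOD)) dp) dp) := by
    intro k
    induction k with
    | zero =>
      intro L dp hL2 hk hinv
      rw [PySem.List.pyRange_one_eq_nil (by omega), List.foldl_nil]
      intro l r
      rw [hinv l r]
      split_ifs with hA hB <;> first | rfl | (exfalso; omega)
    | succ k ih =>
      intro L dp hL2 hk hinv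
      by_cases hdone : (arr.length : Int) + 1 ≤ L
      · rw [PySem.List.pyRange_one_eq_nil (by omega), List.foldl_nil]
        intro l r
        rw [hinv l r]
        split_ifs with hA hB <;> first | rfl | (exfalso; omega)
      · rw [PySem.List.pyRange_one_cons (by omega), List.foldl_cons]
        have hinner := pvInner arr L hL2 1 dp le_rfl hinv
        have hshift : pvInv (1 :: (arr ++ [1])) (arr.length : Int) (L + 1) 1
            ((PySem.List.pyRange 1 ((arr.length : Int) - L + 2) 1).foldl (fun dp l =>
              dp.insert (l, l + L - 1)
                (PySem.Int.mod (pvBestB (1 :: (arr ++ [1])) dp l (l + L - 1)) pvMOD)) dp) := by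
          intro l r
          rw [hinner l r]
          split_ifs with hA hB <;> first | rfl | (exfalso; omega)
        exact ih (L + 1) _ (by omega) (by omega) hshift
  intro L dp hL2 hinv
  exact main (((arr.length : Int) + 1) - L).toNat L dp hL2 le_rfl hinv

-- ===== VERDICT (by name: the statement is the Claim_ definition above) =====
theorem maxBowlingScore_spec : Claim_equal_maxBowlingScore := by
  intro arr _
  unfold Spec_maxBowlingScore
  simp only [maxBowlingScore, maxBowlingScore_alt]
  have h0 : pvInv (1 :: (arr ++ [1])) (arr.length : Int) 2 1 PySem.Dict.empty := by
    intro l r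
    rw [PySem.Dict.getD_empty, if_neg (by omega)]
  have hfin := pvOuter arr 2 PySem.Dict.empty le_rfl h0
  rw [hfin 1 (arr.length : Int)]
  by_cases hn : 2 ≤ (arr.length : Int)
  · rw [if_pos (by omega)]
    unfold pvS
    have hfuel : ((arr.length : Int) - 1 + 1).toNat = arr.length := by omega
    rw [hfuel]
  · rw [if_neg (by omega)]
    rw [pvSolveA_eq_pvS _ _ _ _ (by omega), pvS_short _ _ _ (by omega)]
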